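-- pv_equiv track=rewrite | github.com/moein99/NLP | P2/ClsModel/Maxent/src/maxent_data_gen.py | get_ngrams_feature
-- ===== SOURCE A (Python) =====
-- def get_ngram(data, n):
--     ngrams = []
--     for line in data:
--         ngrams.append({})
--         for i in range(len(line) - n + 1):
--             temp = ' '.join(line[i:i + n])
--             temp = '-'.join(temp.split())
--             if temp in ngrams[-1]:
--                 ngrams[-1][temp] += 1
--             else:
--                 ngrams[-1][temp] = 1
--     return ngrams
--
-- def get_ngrams_feature(data):
--     features = []
--     unigram = get_ngram(data, 1)
--     bigram = get_ngram(data, 2)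
--     trigram = get_ngram(data, 3)
--     ngrams_names = {1: 'uni_', 2: 'bi_', 3: 'tri_'}
--     ngrams = [unigram, bigram, trigram]
--     for i in range(len(data)):
--         string = ""
--         for j in range(len(ngrams)):
--             string += ' '.join(
--                 ngrams_names[j + 1] + str(key) + ':' + str(val) for key, val in ngrams[j][i].items()) + ' '
--         features.append(string)
--     return features
-- ===== SOURCE B (Python) =====
-- def get_ngrams_feature(data):
--     features = []
--     prefixes = ['uni_', 'bi_', 'tri_']
--     for line in data:
--         parts = []
--         for n in [1, 2, 3]:
--             counts = {}
--             for i in range(len(line) - n + 1):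
--                 key = '-'.join(' '.join(line[i:i + n]).split())
--                 counts[key] = counts.get(key, 0) + 1
--             parts.append(' '.join(prefixes[n - 1] + k + ':' + str(v)
--                                   for k, v in counts.items()) + ' ')
--         features.append(''.join(parts))
--     return features
-- ===== Notes on version B (the rewrite author's own statement) =====
-- stated objective: simpler
-- what changed: Replaces the three separate full-corpus get_ngram passes plus the index-based merge loop with a single pass over the lines that builds and formats each line's three local count dicts immediately, so no intermediate parallel lists are kept.
import Mathlib
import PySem

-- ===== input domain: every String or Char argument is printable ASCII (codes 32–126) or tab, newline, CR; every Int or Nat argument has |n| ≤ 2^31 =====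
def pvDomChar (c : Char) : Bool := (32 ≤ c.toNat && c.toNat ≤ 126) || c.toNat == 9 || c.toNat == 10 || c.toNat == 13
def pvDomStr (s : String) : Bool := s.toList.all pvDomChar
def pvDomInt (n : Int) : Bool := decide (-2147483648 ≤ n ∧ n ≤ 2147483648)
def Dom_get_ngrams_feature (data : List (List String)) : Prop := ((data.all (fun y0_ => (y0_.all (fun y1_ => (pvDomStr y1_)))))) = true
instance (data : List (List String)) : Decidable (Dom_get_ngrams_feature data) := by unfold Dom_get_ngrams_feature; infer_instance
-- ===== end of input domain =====

-- B replaces A's three whole-corpus ngram passes + index merge by one pass over the lines; objective: simpler.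

-- normalized ngram key temp = '-'.join(' '.join(line[i:i+n]).split()) — shared subexpression of both sources
def pvNgramKey (line : List String) (n i : Int) : String :=
  PySem.Str.join "-" (PySem.Str.split₀ (PySem.Str.join " " (PySem.List.slice line (some i) (some (i + n)))))

-- ===== PORT A =====
def get_ngram (data : List (List String)) (n : Int) : List (PySem.Dict String Int) :=
  data.foldl (fun ngrams line =>
    ngrams ++ [(PySem.List.pyRange 0 ((line.length : Int) - n + 1) 1).foldl (fun d i =>
      if d.contains (pvNgramKey line n i) then
        d.insert (pvNgramKey line n i) (d.getD (pvNgramKey line n i) 0 + 1)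
      else d.insert (pvNgramKey line n i) 1)
      PySem.Dict.empty]) []

def get_ngrams_feature (data : List (List String)) : List String :=
  (PySem.List.pyRange 0 (data.length : Int) 1).foldl (fun features i =>
    features ++ [(PySem.List.pyRange 0 (([get_ngram data 1, get_ngram data 2, get_ngram data 3].length : Int)) 1).foldl (fun s j =>
      s ++ PySem.Str.join " "
        ((PySem.List.pyGetD (PySem.List.pyGetD [get_ngram data 1, get_ngram data 2, get_ngram data 3] j []) i PySem.Dict.empty).items.map
          (fun kv => (PySem.Dict.ofList [((1:Int), "uni_"), (2, "bi_"), (3, "tri_")]).getD (j + 1) "" ++ kv.1 ++ ":" ++ PySem.Int.toStr kv.2)) ++ " ") ""]) []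

-- ===== PORT B =====
def get_ngrams_feature_alt (data : List (List String)) : List String :=
  data.foldl (fun features line =>
    features ++ [PySem.Str.join "" (([1, 2, 3] : List Int).foldl (fun parts n =>
      parts ++ [PySem.Str.join " "
        (((PySem.List.pyRange 0 ((line.length : Int) - n + 1) 1).foldl (fun counts i =>
            counts.insert (pvNgramKey line n i) (counts.getD (pvNgramKey line n i) 0 + 1))
            PySem.Dict.empty).items.map (fun kv =>
          PySem.List.pyGetD ["uni_", "bi_", "tri_"] (n - 1) "" ++ kv.1 ++ ":" ++ PySem.Int.toStr kv.2)) ++ " "]) [])]) []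

-- ===== PRECONDITION & SPEC =====
def Spec_get_ngrams_feature (data : List (List String)) (out : List String) : Prop := out = get_ngrams_feature_alt data
instance (data : List (List String)) (out : List String) : Decidable (Spec_get_ngrams_feature data out) := by unfold Spec_get_ngrams_feature; infer_instance

-- ===== CLAIM (what is proved, stated in full; the proofs are below) =====
def Claim_equal_get_ngrams_feature : Prop := ∀ (data : List (List String)), Dom_get_ngrams_feature data → Spec_get_ngrams_feature data (get_ngrams_feature data)

-- ===== LEMMAS AND PROOFS =====
-- helpers used only by the proofs
def pvLineDict (line : List String) (n : Int) : PySem.Dict String Int :=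
  (PySem.List.pyRange 0 ((line.length : Int) - n + 1) 1).foldl
    (fun d i => d.insert (pvNgramKey line n i) (d.getD (pvNgramKey line n i) 0 + 1)) PySem.Dict.empty

def pvPart (line : List String) (n : Int) (pre : String) : String :=
  PySem.Str.join " " ((pvLineDict line n).items.map (fun kv => pre ++ kv.1 ++ ":" ++ PySem.Int.toStr kv.2)) ++ " "

lemma pv_join3 (a b c : String) : PySem.Str.join "" [a, b, c] = a ++ (b ++ c) := by
  simp [PySem.Str.join, PySem.Chars.join, List.intercalate]

lemma pv_pre1 : PySem.List.pyGetD ["uni_", "bi_", "tri_"] ((1 : Int) - 1) "" = "uni_" := by rfl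
lemma pv_pre2 : PySem.List.pyGetD ["uni_", "bi_", "tri_"] ((2 : Int) - 1) "" = "bi_" := by rfl
lemma pv_pre3 : PySem.List.pyGetD ["uni_", "bi_", "tri_"] ((3 : Int) - 1) "" = "tri_" := by rfl

lemma pv_step_eq (d : PySem.Dict String Int) (k : String) :
    (if d.contains k then d.insert k (d.getD k 0 + 1) else d.insert k 1) = d.insert k (d.getD k 0 + 1) := by
  by_cases h : d.contains k
  · simp [h]
  · simp only [Bool.not_eq_true] at h
    simp [h, PySem.Dict.getD_of_not_contains d 0 h]

lemma pv_get_ngram_eq (data : List (List String)) (n : Int) :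
    get_ngram data n = data.map (fun line => pvLineDict line n) := by
  unfold get_ngram pvLineDict
  simp only [pv_step_eq]
  exact PySem.List.foldl_append_singleton_eq_map _ data []

lemma pv_alt_eq (data : List (List String)) :
    get_ngrams_feature_alt data
      = data.map (fun line => pvPart line 1 "uni_" ++ (pvPart line 2 "bi_" ++ pvPart line 3 "tri_")) := by
  unfold get_ngrams_feature_alt
  rw [show (fun (features : List String) (line : List String) =>
      features ++ [PySem.Str.join "" (([1, 2, 3] : List Int).foldl (fun parts n =>
      parts ++ [PySem.Str.join " "
        (((PySem.List.pyRange 0 ((line.length : Int) - n + 1) 1).foldl (fun counts i =>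
            counts.insert (pvNgramKey line n i) (counts.getD (pvNgramKey line n i) 0 + 1))
            PySem.Dict.empty).items.map (fun kv =>
          PySem.List.pyGetD ["uni_", "bi_", "tri_"] (n - 1) "" ++ kv.1 ++ ":" ++ PySem.Int.toStr kv.2)) ++ " "]) [])])
    = (fun features line => features ++ [pvPart line 1 "uni_" ++ (pvPart line 2 "bi_" ++ pvPart line 3 "tri_")]) from ?_,
    PySem.List.foldl_append_singleton_eq_map _ data []]
  · rfl
  · funext features line
    simp only [List.foldl, List.nil_append, List.cons_append]
    rw [pv_join3]
    simp only [pv_pre1, pv_pre2, pv_pre3, pvPart, pvLineDict]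


lemma pv_pyGetD_map_inrange {α β : Type} (f : α → β) (xs : List α) (i : Int) (d : β) (d' : α)
    (h0 : 0 ≤ i) (h1 : i < (xs.length : Int)) :
    PySem.List.pyGetD (xs.map f) i d = f (PySem.List.pyGetD xs i d') := by
  rw [PySem.List.pyGetD_eq_getElem _ _ h0 (by simpa using h1),
      PySem.List.pyGetD_eq_getElem _ _ h0 h1]
  simp

lemma pv_range3 : PySem.List.pyRange 0 3 1 = [0, 1, 2] := by rfl
lemma pv_name1 : (PySem.Dict.ofList [((1 : Int), "uni_"), (2, "bi_"), (3, "tri_")]).getD ((0 : Int) + 1) "" = "uni_" := by rfl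
lemma pv_name2 : (PySem.Dict.ofList [((1 : Int), "uni_"), (2, "bi_"), (3, "tri_")]).getD ((1 : Int) + 1) "" = "bi_" := by rfl
lemma pv_name3 : (PySem.Dict.ofList [((1 : Int), "uni_"), (2, "bi_"), (3, "tri_")]).getD ((2 : Int) + 1) "" = "tri_" := by rfl
lemma pv_idx0 {α : Type} (a b c : α) (d : α) : PySem.List.pyGetD [a, b, c] 0 d = a := by rfl
lemma pv_idx1 {α : Type} (a b c : α) (d : α) : PySem.List.pyGetD [a, b, c] 1 d = b := by rfl
lemma pv_idx2 {α : Type} (a b c : α) (d : α) : PySem.List.pyGetD [a, b, c] 2 d = c := by rfl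

lemma pv_flatten_map_singleton {α β : Type} (f : α → β) (l : List α) :
    (l.map (fun x => [f x])).flatten = l.map f := by
  induction l with
  | nil => rfl
  | cons a t ih => simp [ih]

lemma pv_A_eq (data : List (List String)) :
    get_ngrams_feature data
      = data.map (fun line => pvPart line 1 "uni_" ++ (pvPart line 2 "bi_" ++ pvPart line 3 "tri_")) := by
  unfold get_ngrams_feature
  simp only [pv_get_ngram_eq]
  norm_num
  simp only [pv_range3, List.foldl, pv_idx0, pv_idx1, pv_idx2, pv_name1, pv_name2, pv_name3]
  rw [pv_flatten_map_singleton]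
  rw [List.map_congr_left (g := fun i =>
        (fun line => pvPart line 1 "uni_" ++ (pvPart line 2 "bi_" ++ pvPart line 3 "tri_"))
          (PySem.List.pyGetD data i []))
      ?_]
  · rw [show (fun i => (fun line => pvPart line 1 "uni_" ++ (pvPart line 2 "bi_" ++ pvPart line 3 "tri_"))
          (PySem.List.pyGetD data i []))
        = ((fun line => pvPart line 1 "uni_" ++ (pvPart line 2 "bi_" ++ pvPart line 3 "tri_"))
            ∘ (fun i => PySem.List.pyGetD data i [])) from rfl,
      ← List.map_map, PySem.List.map_pyGetD_pyRange_zero']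
  · intro i hi
    rw [PySem.List.mem_pyRange_one] at hi
    rw [pv_pyGetD_map_inrange _ data i _ [] hi.1 (by simpa using hi.2),
        pv_pyGetD_map_inrange _ data i _ [] hi.1 (by simpa using hi.2),
        pv_pyGetD_map_inrange _ data i _ [] hi.1 (by simpa using hi.2)]
    simp [pvPart, String.append_assoc]

-- ===== VERDICT (by name: the statement is the Claim_ definition above) =====
theorem get_ngrams_feature_spec : Claim_equal_get_ngrams_feature := by
  intro data _
  unfold Spec_get_ngrams_feature
  rw [pv_A_eq, pv_alt_eq]
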